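-- pv_equiv track=rewrite | github.com/yu-hui-lin/OTOAlyzer | depth_calling/haplotype.py | get_hap_counts
-- ===== SOURCE A (Python) =====
-- from typing import Dict, List, Optional, Set, Tuple, Any
--
-- def get_hap_counts(
--     dread: Dict[str, Dict[int, Optional[str]]],
--     base1: List[str],
--     base2: List[str],
--     target_positions: List[int],
-- ) -> Dict[str, str]:
--     """
--     Translate observed bases into haplotype strings.
--
--     For each read, convert the observed bases to a haplotype code:
--     - "1" = matches true gene allele (base1)
--     - "2" = matches pseudogene allele (base2)
--     - "x" = missing or unknown
--
--     Args:
--         dread: Dictionary of read bases from get_bases_per_read()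
--         base1: True gene reference alleles
--         base2: Pseudogene reference alleles
--         target_positions: List of target position indices
--
--     Returns:
--         Dictionary: {read_name: haplotype_string}
--     """
--     dread_hap = {}
--     sorted_positions = sorted(target_positions)
--
--     for read_name, read_bases in dread.items():
--         pos_list = ["x"] * len(sorted_positions)
--
--         for i, pos in enumerate(sorted_positions):
--             base = read_bases.get(pos)
--
--             if base is None:
--                 continue
--
--             # Check if base matches true gene allele
--             for allele in base1[i].split(","):
--                 if base.upper() == allele.upper():
--                     pos_list[i] = "1"
--                     break
--
--             # Check if base matches pseudogene allele
--             if pos_list[i] == "x":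
--                 for allele in base2[i].split(","):
--                     if base.upper() == allele.upper():
--                         pos_list[i] = "2"
--                         break
--
--         dread_hap[read_name] = "".join(pos_list)
--
--     return dread_hap
-- ===== SOURCE B (Python) =====
-- def get_hap_counts(dread, base1, base2, target_positions):
--     sorted_positions = sorted(target_positions)
--     n = len(sorted_positions)
--     # one dict per position: allele (uppercased) -> code; base2 first so base1 overwrites (base1 wins)
--     table = []
--     for i in range(n):
--         d = {}
--         for allele in base2[i].split(","):
--             d[allele.upper()] = "2"
--         for allele in base1[i].split(","):
--             d[allele.upper()] = "1"
--         table.append(d)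
--     dread_hap = {}
--     for read_name, read_bases in dread.items():
--         codes = []
--         for i in range(n):
--             base = read_bases.get(sorted_positions[i])
--             codes.append("x" if base is None else table[i].get(base.upper(), "x"))
--         dread_hap[read_name] = "".join(codes)
--     return dread_hap
-- ===== Notes on version B (the rewrite author's own statement) =====
-- stated objective: alternative
-- what changed: Precomputes, once per position, a dict mapping each uppercased allele to its code (base2 inserted first so base1 overwrites and keeps precedence); the per-read inner allele-scanning loops disappear, replaced by a single dict lookup per (read, position).
-- outside the precondition, e.g. on get_hap_counts({}, ['A'], ['C'], [0, 1]): A returns {}, B raises IndexError; on get_hap_counts({'r': {5: 'A'}}, [], [], [0]): A returns {'r': 'x'}, B raises IndexError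
import Mathlib
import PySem

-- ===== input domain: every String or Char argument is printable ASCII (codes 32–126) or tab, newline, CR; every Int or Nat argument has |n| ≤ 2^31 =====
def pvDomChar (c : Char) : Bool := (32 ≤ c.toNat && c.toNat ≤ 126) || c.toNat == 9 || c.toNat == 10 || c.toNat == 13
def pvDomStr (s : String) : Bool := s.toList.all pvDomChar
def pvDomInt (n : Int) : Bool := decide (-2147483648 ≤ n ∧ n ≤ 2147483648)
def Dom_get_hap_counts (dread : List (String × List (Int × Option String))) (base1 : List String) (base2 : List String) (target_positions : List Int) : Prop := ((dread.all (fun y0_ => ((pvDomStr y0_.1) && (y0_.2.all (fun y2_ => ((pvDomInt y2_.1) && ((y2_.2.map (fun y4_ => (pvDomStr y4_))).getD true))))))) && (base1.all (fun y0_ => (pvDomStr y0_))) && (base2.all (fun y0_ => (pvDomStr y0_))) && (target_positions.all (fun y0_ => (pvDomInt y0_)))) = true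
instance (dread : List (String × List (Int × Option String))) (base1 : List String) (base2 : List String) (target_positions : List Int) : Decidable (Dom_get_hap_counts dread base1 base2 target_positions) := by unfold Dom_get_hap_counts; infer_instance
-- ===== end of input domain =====

-- B precomputes one allele→code dict per sorted position (base2 inserted first so base1 overwrites),
-- removing the per-read inner allele-scanning loops: one dict lookup per (read, position).

-- ===== PORT A =====

-- the loop 'for allele in alleles: if base.upper() == allele.upper(): … break' as a predicate (break = early true)
def pvMatch (alleles : List String) (base : String) : Bool :=
  match alleles with
  | [] => false
  | a :: rest => if PySem.Str.upper base == PySem.Str.upper a then true else pvMatch rest base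

def get_hap_counts (dread : List (String × List (Int × Option String))) (base1 : List String) (base2 : List String) (target_positions : List Int) : List (String × String) :=
  let sorted_positions := PySem.List.sorted target_positions (fun x => x) false
  ((PySem.Dict.ofList dread).items).foldl (fun dread_hap rp =>
    let pos_list :=
      (PySem.List.enumerate sorted_positions 0).foldl (fun pos_list ip =>
        match ((PySem.Dict.ofList rp.2).get? ip.2).bind (fun b => b) with
        | none => pos_list   -- base is None: continue
        | some base =>
          let pos_list1 :=
            if pvMatch ((PySem.Str.split? (PySem.List.pyGetD base1 ip.1 "") ",").getD []) base
            then PySem.List.pySetD pos_list ip.1 "1" else pos_list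
          if PySem.List.pyGetD pos_list1 ip.1 "" == "x" then
            if pvMatch ((PySem.Str.split? (PySem.List.pyGetD base2 ip.1 "") ",").getD []) base
            then PySem.List.pySetD pos_list1 ip.1 "2" else pos_list1
          else pos_list1)
        (List.replicate sorted_positions.length "x")
    dread_hap ++ [(rp.1, PySem.Str.join "" pos_list)]) []

-- ===== PORT B =====

-- one position's dict: base2 alleles as "2" first, then base1 alleles as "1" (overwrite keeps base1 precedence)
def pvTableEntry (b2 b1 : String) : PySem.Dict String String :=
  ((PySem.Str.split? b1 ",").getD []).foldl (fun d a => d.insert (PySem.Str.upper a) "1")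
    (((PySem.Str.split? b2 ",").getD []).foldl (fun d a => d.insert (PySem.Str.upper a) "2") PySem.Dict.empty)

def get_hap_counts_alt (dread : List (String × List (Int × Option String))) (base1 : List String) (base2 : List String) (target_positions : List Int) : List (String × String) :=
  let sorted_positions := PySem.List.sorted target_positions (fun x => x) false
  let n : Int := PySem.List.len sorted_positions
  let table := (PySem.List.pyRange 0 n 1).map (fun i =>
    pvTableEntry (PySem.List.pyGetD base2 i "") (PySem.List.pyGetD base1 i ""))
  ((PySem.Dict.ofList dread).items).foldl (fun out rp =>
    let codes := (PySem.List.pyRange 0 n 1).map (fun i =>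
      match ((PySem.Dict.ofList rp.2).get? (PySem.List.pyGetD sorted_positions i 0)).bind (fun b => b) with
      | none => "x"
      | some base => (PySem.List.pyGetD table i PySem.Dict.empty).getD (PySem.Str.upper base) "x")
    out ++ [(rp.1, PySem.Str.join "" codes)]) []

-- ===== PRECONDITION & SPEC =====
-- Pre_ excludes inputs where base1/base2 are shorter than target_positions: there Python A raises
-- IndexError as soon as some read covers an out-of-range position, and only accidentally returns
-- (reads happen to miss the offending positions) otherwise; B's table precomputation raises there.
def Pre_get_hap_counts (dread : List (String × List (Int × Option String))) (base1 : List String) (base2 : List String) (target_positions : List Int) : Prop :=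
  target_positions.length ≤ base1.length ∧ target_positions.length ≤ base2.length
instance (dread : List (String × List (Int × Option String))) (base1 : List String) (base2 : List String) (target_positions : List Int) : Decidable (Pre_get_hap_counts dread base1 base2 target_positions) := by unfold Pre_get_hap_counts; infer_instance

def pvWitness_get_hap_counts : (List (String × List (Int × Option String))) × List String × List String × List Int :=
  ([("r1", [((5 : Int), some "a")]), ("r2", [((5 : Int), none)])], ["A,a"], ["C"], [(5 : Int)])

def Spec_get_hap_counts (dread : List (String × List (Int × Option String))) (base1 : List String) (base2 : List String) (target_positions : List Int) (out : List (String × String)) : Prop := out = get_hap_counts_alt dread base1 base2 target_positions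
instance (dread : List (String × List (Int × Option String))) (base1 : List String) (base2 : List String) (target_positions : List Int) (out : List (String × String)) : Decidable (Spec_get_hap_counts dread base1 base2 target_positions out) := by unfold Spec_get_hap_counts; infer_instance

-- ===== CLAIM (what is proved, stated in full; the proofs are below) =====
def Claim_equal_get_hap_counts : Prop := ∀ (dread : List (String × List (Int × Option String))) (base1 : List String) (base2 : List String) (target_positions : List Int), Dom_get_hap_counts dread base1 base2 target_positions → Pre_get_hap_counts dread base1 base2 target_positions → Spec_get_hap_counts dread base1 base2 target_positions (get_hap_counts dread base1 base2 target_positions)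

-- ===== LEMMAS AND PROOFS =====

-- the per-index code both loops compute
def pvCode (b? : Option String) (l1 l2 : List String) : String :=
  match b? with
  | none => "x"
  | some base =>
    if l1.any (fun a => PySem.Str.upper base == PySem.Str.upper a) then "1"
    else if l2.any (fun a => PySem.Str.upper base == PySem.Str.upper a) then "2"
    else "x"

theorem pvMatch_any (l : List String) (base : String) :
    pvMatch l base = l.any (fun a => PySem.Str.upper base == PySem.Str.upper a) := by
  induction l with
  | nil => rfl
  | cons a rest ih =>
    by_cases h : PySem.Str.upper base = PySem.Str.upper a <;> simp [pvMatch, ih, h]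

theorem getD_foldl_insert (l : List String) (d : PySem.Dict String String)
    (f : String → String) (v u d0 : String) :
    (l.foldl (fun d a => d.insert (f a) v) d).getD u d0
      = if l.any (fun a => u == f a) then v else d.getD u d0 := by
  induction l generalizing d with
  | nil => simp
  | cons a rest ih =>
    simp only [List.foldl_cons, List.any_cons, ih, PySem.Dict.getD_insert]
    by_cases h : u = f a
    · simp [h]
    · simp only [h, if_false]
      simp [h]

theorem pvTableEntry_getD (b2 b1 base : String) :
    (pvTableEntry b2 b1).getD (PySem.Str.upper base) "x"
      = pvCode (some base) ((PySem.Str.split? b1 ",").getD []) ((PySem.Str.split? b2 ",").getD []) := by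
  unfold pvTableEntry pvCode
  rw [getD_foldl_insert, getD_foldl_insert]
  simp

-- A's per-read loop over enumerate(sorted_positions), characterised index by index
theorem pvLoopA (b? : Int → Option String) (l1 l2 : Int → List String) :
    ∀ (m k : Nat) (pre : List String), pre.length = k →
    (PySem.List.pyRange (k : Int) ((k : Int) + (m : Int)) 1).foldl (fun pos_list i =>
        match b? i with
        | none => pos_list
        | some base =>
          let pos_list1 :=
            if pvMatch (l1 i) base then PySem.List.pySetD pos_list i "1" else pos_list
          if PySem.List.pyGetD pos_list1 i "" == "x" then
            if pvMatch (l2 i) base then PySem.List.pySetD pos_list1 i "2" else pos_list1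
          else pos_list1)
      (pre ++ List.replicate m "x")
    = pre ++ (PySem.List.pyRange (k : Int) ((k : Int) + (m : Int)) 1).map (fun i =>
        pvCode (b? i) (l1 i) (l2 i)) := by
  intro m
  induction m with
  | zero => intro k pre h; simp [PySem.List.pyRange_one_eq_nil]
  | succ m ih =>
    intro k pre h
    have hcons : PySem.List.pyRange (k : Int) ((k : Int) + ((m + 1 : Nat) : Int)) 1
        = (k : Int) :: PySem.List.pyRange ((k + 1 : Nat) : Int) (((k + 1 : Nat) : Int) + (m : Int)) 1 := by
      rw [PySem.List.pyRange_one_cons (by push_cast; omega)]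
      have e1 : ((k : Int) + 1) = ((k + 1 : Nat) : Int) := by push_cast; ring
      have e2 : ((k : Int) + ((m + 1 : Nat) : Int)) = ((k + 1 : Nat) : Int) + (m : Int) := by
        push_cast; ring
      rw [e1, e2]
    rw [hcons]
    simp only [List.foldl_cons, List.map_cons]
    have hstep : ∀ rest : List String,
        (match b? (k : Int) with
        | none => pre ++ "x" :: rest
        | some base =>
          let pos_list1 :=
            if pvMatch (l1 (k : Int)) base then PySem.List.pySetD (pre ++ "x" :: rest) (k : Int) "1" else pre ++ "x" :: rest
          if PySem.List.pyGetD pos_list1 (k : Int) "" == "x" then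
            if pvMatch (l2 (k : Int)) base then PySem.List.pySetD pos_list1 (k : Int) "2" else pos_list1
          else pos_list1)
        = pre ++ pvCode (b? (k : Int)) (l1 (k : Int)) (l2 (k : Int)) :: rest := by
      intro rest
      have hset1 : PySem.List.pySetD (pre ++ "x" :: rest) (k : Int) "1" = pre ++ "1" :: rest := by
        rw [← h, PySem.List.pySetD_natCast]; simp
      have hset2 : PySem.List.pySetD (pre ++ "x" :: rest) (k : Int) "2" = pre ++ "2" :: rest := by
        rw [← h, PySem.List.pySetD_natCast]; simp
      have hg1 : PySem.List.pyGetD (pre ++ "1" :: rest) (k : Int) "" = "1" := by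
        rw [← h, PySem.List.pyGetD_natCast]; simp [List.getD_eq_getElem?_getD]
      have hgx : PySem.List.pyGetD (pre ++ "x" :: rest) (k : Int) "" = "x" := by
        rw [← h, PySem.List.pyGetD_natCast]; simp [List.getD_eq_getElem?_getD]
      cases hb : b? (k : Int) with
      | none => simp [pvCode]
      | some base =>
        simp only [pvCode, pvMatch_any]
        by_cases h1 : (l1 (k : Int)).any (fun a => PySem.Str.upper base == PySem.Str.upper a) = true
        · rw [if_pos h1, if_pos h1, hset1, hg1]
          simp
        · rw [if_neg h1, if_neg h1, hgx]
          by_cases h2 : (l2 (k : Int)).any (fun a => PySem.Str.upper base == PySem.Str.upper a) = true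
          · rw [if_pos (by simp), if_pos h2, if_pos h2, hset2]
          · rw [if_pos (by simp), if_neg h2, if_neg h2]
    have hrepl : pre ++ List.replicate (m + 1) "x" = pre ++ "x" :: List.replicate m "x" := by
      simp [List.replicate_succ]
    rw [hrepl, hstep (List.replicate m "x")]
    have hpre1 : pre ++ pvCode (b? (k : Int)) (l1 (k : Int)) (l2 (k : Int)) :: List.replicate m "x"
        = (pre ++ [pvCode (b? (k : Int)) (l1 (k : Int)) (l2 (k : Int))]) ++ List.replicate m "x" := by
      simp
    rw [hpre1, ih (k + 1) _ (by simp [h])]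
    simp

-- per read: A's pos_list equals B's codes list
theorem pvRead_eq (rb : List (Int × Option String)) (base1 base2 : List String) (pos : List Int) :
    (PySem.List.enumerate pos 0).foldl (fun pos_list ip =>
        match ((PySem.Dict.ofList rb).get? ip.2).bind (fun b => b) with
        | none => pos_list
        | some base =>
          let pos_list1 :=
            if pvMatch ((PySem.Str.split? (PySem.List.pyGetD base1 ip.1 "") ",").getD []) base
            then PySem.List.pySetD pos_list ip.1 "1" else pos_list
          if PySem.List.pyGetD pos_list1 ip.1 "" == "x" then
            if pvMatch ((PySem.Str.split? (PySem.List.pyGetD base2 ip.1 "") ",").getD []) base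
            then PySem.List.pySetD pos_list1 ip.1 "2" else pos_list1
          else pos_list1)
      (List.replicate pos.length "x")
    = (PySem.List.pyRange 0 (PySem.List.len pos) 1).map (fun i =>
        match ((PySem.Dict.ofList rb).get? (PySem.List.pyGetD pos i 0)).bind (fun b => b) with
        | none => "x"
        | some base =>
          (PySem.List.pyGetD ((PySem.List.pyRange 0 (PySem.List.len pos) 1).map (fun i =>
              pvTableEntry (PySem.List.pyGetD base2 i "") (PySem.List.pyGetD base1 i "")))
            i PySem.Dict.empty).getD (PySem.Str.upper base) "x") := by
  rw [PySem.List.enumerate_eq_map_pyRange pos 0, List.foldl_map]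
  have h0 : PySem.List.pyRange 0 (PySem.List.len pos) 1
      = PySem.List.pyRange ((0 : Nat) : Int) (((0 : Nat) : Int) + (pos.length : Int)) 1 := by
    simp [PySem.List.len_eq]
  rw [h0]
  refine Eq.trans (pvLoopA (fun i => ((PySem.Dict.ofList rb).get? (PySem.List.pyGetD pos i 0)).bind (fun b => b))
        (fun i => (PySem.Str.split? (PySem.List.pyGetD base1 i "") ",").getD [])
        (fun i => (PySem.Str.split? (PySem.List.pyGetD base2 i "") ",").getD [])
        pos.length 0 [] rfl) ?_
  rw [List.nil_append]
  simp only [Nat.cast_zero, zero_add]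
  apply List.map_congr_left
  intro i hi
  have hmem := (PySem.List.mem_pyRange_one).mp hi
  cases hb : ((PySem.Dict.ofList rb).get? (PySem.List.pyGetD pos i 0)).bind (fun b => b) with
  | none => simp [pvCode]
  | some base =>
    simp only [pvCode]
    rw [PySem.List.pyGetD_map_pyRange_of_nonneg _ _ _ _ (by omega) (by omega)]
    rw [pvTableEntry_getD]
    rfl

-- ===== VERDICT (by name: the statement is the Claim_ definition above) =====
theorem get_hap_counts_spec : Claim_equal_get_hap_counts := by
  intro dread base1 base2 target_positions _ _
  unfold Spec_get_hap_counts get_hap_counts get_hap_counts_alt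
  apply PySem.List.foldl_congr_mem
  intro acc rp _
  simp only [pvRead_eq rp.2 base1 base2 (PySem.List.sorted target_positions (fun x => x) false)]
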